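-- pv_equiv track=rewrite | github.com/showmeyourfeet/AAAA | llp/dataset.py | _flatten_indices
-- ===== SOURCE A (Python) =====
-- from typing import Dict, Sequence, Tuple
--
-- def _flatten_indices(
--     all_indices: Sequence[Tuple[str, int]],
--     last_dataset_indices: Sequence[Tuple[str, int]],
--     dataset_sizes: Dict[str, int],
-- ) -> Tuple[list[int], list[int]]:
--     flat_other_indices: list[int] = []
--     flat_last_dataset_indices: list[int] = []
--     cumulative_size = 0
--
--     for dataset_dir, size in dataset_sizes.items():
--         for idx in range(size):
--             if (dataset_dir, idx) in last_dataset_indices: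
--                 flat_last_dataset_indices.append(cumulative_size + idx)
--             elif (dataset_dir, idx) in all_indices:
--                 flat_other_indices.append(cumulative_size + idx)
--         cumulative_size += size
--
--     return flat_other_indices, flat_last_dataset_indices
-- ===== SOURCE B (Python) =====
-- def _flatten_indices(all_indices, last_dataset_indices, dataset_sizes):
--     last_by = {}
--     for d, i in last_dataset_indices:
--         last_by.setdefault(d, []).append(i)
--     all_by = {}
--     for d, i in all_indices:
--         all_by.setdefault(d, []).append(i)
--     flat_other_indices = []
--     flat_last_dataset_indices = []
--     cumulative_size = 0
--     for dataset_dir, size in dataset_sizes.items():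
--         last_local = {i for i in last_by.get(dataset_dir, []) if 0 <= i < size}
--         other_local = {i for i in all_by.get(dataset_dir, [])
--                        if 0 <= i < size and i not in last_local}
--         flat_last_dataset_indices.extend(cumulative_size + i for i in sorted(last_local))
--         flat_other_indices.extend(cumulative_size + i for i in sorted(other_local))
--         cumulative_size += size
--     return flat_other_indices, flat_last_dataset_indices
-- ===== Notes on version B (the rewrite author's own statement) =====
-- stated objective: faster
-- what changed: B groups the index tuples by dataset in two dicts built in one pass, then per dataset collects the valid local indices into a set and sorts them, instead of A's scan over every index 0..size-1 with a list-membership test per index.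
import Mathlib
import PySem

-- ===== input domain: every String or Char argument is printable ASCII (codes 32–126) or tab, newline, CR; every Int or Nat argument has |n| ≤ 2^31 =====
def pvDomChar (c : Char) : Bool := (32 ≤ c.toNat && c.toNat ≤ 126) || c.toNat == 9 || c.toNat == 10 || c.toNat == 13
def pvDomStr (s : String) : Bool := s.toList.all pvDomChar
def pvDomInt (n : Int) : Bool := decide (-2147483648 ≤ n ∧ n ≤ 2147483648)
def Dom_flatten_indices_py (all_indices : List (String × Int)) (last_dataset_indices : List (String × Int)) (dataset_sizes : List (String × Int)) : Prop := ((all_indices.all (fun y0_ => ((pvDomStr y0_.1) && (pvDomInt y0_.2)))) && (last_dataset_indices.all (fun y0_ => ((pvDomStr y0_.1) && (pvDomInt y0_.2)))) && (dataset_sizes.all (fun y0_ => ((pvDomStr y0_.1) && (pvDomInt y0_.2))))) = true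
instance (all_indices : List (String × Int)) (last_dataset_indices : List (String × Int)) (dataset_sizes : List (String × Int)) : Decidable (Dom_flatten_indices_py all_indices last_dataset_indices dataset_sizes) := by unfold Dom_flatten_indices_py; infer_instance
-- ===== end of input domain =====

-- B groups the index tuples by dataset once (dict of lists), then per dataset set-collects the
-- valid local indices and sorts them, instead of A's scan over range(size) with list-membership tests.

-- ===== PORT A =====
def flatten_indices_py (all_indices : List (String × Int)) (last_dataset_indices : List (String × Int)) (dataset_sizes : List (String × Int)) : List Int × List Int :=
  let r := dataset_sizes.foldl (fun (st : List Int × List Int × Int) ds =>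
    let inner := (PySem.List.pyRange 0 ds.2 1).foldl
      (fun (s : List Int × List Int) idx =>
        if (ds.1, idx) ∈ last_dataset_indices then (s.1, s.2 ++ [st.2.2 + idx])
        else if (ds.1, idx) ∈ all_indices then (s.1 ++ [st.2.2 + idx], s.2)
        else s) (st.1, st.2.1)
    (inner.1, inner.2, st.2.2 + ds.2)) ([], [], 0)
  (r.1, r.2.1)

-- ===== PORT B =====
-- last_by/all_by: {}; for d, i in pairs: by.setdefault(d, []).append(i)
def pvGroupByKey (pairs : List (String × Int)) : PySem.Dict String (List Int) :=
  pairs.foldl (fun by_ p => by_.modify p.1 [] (fun l => l ++ [p.2])) PySem.Dict.empty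

def flatten_indices_py_alt (all_indices : List (String × Int)) (last_dataset_indices : List (String × Int)) (dataset_sizes : List (String × Int)) : List Int × List Int :=
  let last_by := pvGroupByKey last_dataset_indices
  let all_by := pvGroupByKey all_indices
  let r := dataset_sizes.foldl (fun (st : List Int × List Int × Int) ds =>
    -- {i for i in last_by.get(dataset_dir, []) if 0 <= i < size}
    let lastLocal := PySem.Set.ofList ((last_by.getD ds.1 []).filter
      (fun i => decide (0 ≤ i ∧ i < ds.2)))
    -- {i for i in all_by.get(dataset_dir, []) if 0 <= i < size and i not in last_local}
    let otherLocal := PySem.Set.ofList ((all_by.getD ds.1 []).filter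
      (fun i => decide (0 ≤ i ∧ i < ds.2 ∧ i ∉ lastLocal)))
    (st.1 ++ (PySem.List.sorted otherLocal (fun x => x) false).map (fun i => st.2.2 + i),
     st.2.1 ++ (PySem.List.sorted lastLocal (fun x => x) false).map (fun i => st.2.2 + i),
     st.2.2 + ds.2)) ([], [], 0)
  (r.1, r.2.1)

-- ===== PRECONDITION & SPEC =====
def Spec_flatten_indices_py (all_indices : List (String × Int)) (last_dataset_indices : List (String × Int)) (dataset_sizes : List (String × Int)) (out : List Int × List Int) : Prop := out = flatten_indices_py_alt all_indices last_dataset_indices dataset_sizes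
instance (all_indices : List (String × Int)) (last_dataset_indices : List (String × Int)) (dataset_sizes : List (String × Int)) (out : List Int × List Int) : Decidable (Spec_flatten_indices_py all_indices last_dataset_indices dataset_sizes out) := by unfold Spec_flatten_indices_py; infer_instance

-- ===== CLAIM (what is proved, stated in full; the proofs are below) =====
def Claim_equal_flatten_indices_py : Prop := ∀ (all_indices : List (String × Int)) (last_dataset_indices : List (String × Int)) (dataset_sizes : List (String × Int)), Dom_flatten_indices_py all_indices last_dataset_indices dataset_sizes → Spec_flatten_indices_py all_indices last_dataset_indices dataset_sizes (flatten_indices_py all_indices last_dataset_indices dataset_sizes)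

-- ===== LEMMAS AND PROOFS =====

-- A's inner loop over range(size): appends to the two accumulators the filtered, shifted indices.
theorem pvInner (lastL allL : List (String × Int)) (d : String) (c : Int) (l : List Int) :
    ∀ (o t : List Int),
    l.foldl (fun (s : List Int × List Int) idx =>
        if (d, idx) ∈ lastL then (s.1, s.2 ++ [c + idx])
        else if (d, idx) ∈ allL then (s.1 ++ [c + idx], s.2) else s) (o, t)
    = (o ++ (l.filter (fun i => decide ((d, i) ∉ lastL ∧ (d, i) ∈ allL))).map (fun i => c + i),
       t ++ (l.filter (fun i => decide ((d, i) ∈ lastL))).map (fun i => c + i)) := by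
  induction l with
  | nil => intro o t; simp
  | cons x xs ih =>
    intro o t
    simp only [List.foldl_cons, List.filter_cons]
    by_cases h1 : (d, x) ∈ lastL
    · simp [h1, ih]
    · by_cases h2 : (d, x) ∈ allL
      · simp [h1, h2, ih]
      · simp [h1, h2, ih]

theorem pvGroupByKey_getD (pairs : List (String × Int)) (d : String) :
    (pvGroupByKey pairs).getD d [] = (pairs.filter (fun p => p.1 == d)).map (fun p => p.2) := by
  unfold pvGroupByKey
  rw [PySem.Dict.getD_foldl_modify_append]
  simp

theorem pvMemGroupFilter (pairs : List (String × Int)) (d : String) (q : Int → Prop)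
    [DecidablePred q] (i : Int) :
    i ∈ PySem.Set.ofList (((pvGroupByKey pairs).getD d []).filter (fun i => decide (q i)))
      ↔ (d, i) ∈ pairs ∧ q i := by
  rw [PySem.Set.mem_ofList, List.mem_filter, pvGroupByKey_getD]
  simp only [List.mem_map, List.mem_filter, beq_iff_eq, decide_eq_true_eq]
  constructor
  · rintro ⟨⟨⟨pd, pi⟩, ⟨hp, rfl⟩, rfl⟩, hq⟩
    exact ⟨hp, hq⟩
  · rintro ⟨hmem, hq⟩
    exact ⟨⟨(d, i), ⟨hmem, rfl⟩, rfl⟩, hq⟩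

-- sorting a set whose members are exactly the p-satisfying indices of [0, s) gives the range filter
theorem pvSortedSet (xs : PySem.Set Int) (hnd : xs.Nodup) (s : Int) (p : Int → Prop) [DecidablePred p]
    (hmem : ∀ i, i ∈ xs ↔ p i ∧ 0 ≤ i ∧ i < s) :
    PySem.List.sorted xs (fun x => x) false
      = (PySem.List.pyRange 0 s 1).filter (fun i => decide (p i)) := by
  apply PySem.List.sorted_eq_of_perm_of_pairwise_lt
  · rw [List.perm_ext_iff_of_nodup (List.Nodup.filter _ (PySem.List.nodup_pyRange_one 0 s)) hnd]
    intro a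
    rw [hmem]
    simp [List.mem_filter, PySem.List.mem_pyRange_one]
    tauto
  · exact List.Pairwise.filter _ (PySem.List.pairwise_lt_pyRange_one 0 s)

-- ===== VERDICT (by name: the statement is the Claim_ definition above) =====
theorem flatten_indices_py_spec : Claim_equal_flatten_indices_py := by
  intro all_indices last_dataset_indices dataset_sizes _
  unfold Spec_flatten_indices_py flatten_indices_py flatten_indices_py_alt
  have memLast : ∀ (ds : String × Int) (i : Int),
      i ∈ PySem.Set.ofList (((pvGroupByKey last_dataset_indices).getD ds.1 []).filter
            (fun i => decide (0 ≤ i ∧ i < ds.2)))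
        ↔ (ds.1, i) ∈ last_dataset_indices ∧ 0 ≤ i ∧ i < ds.2 := fun ds i =>
    pvMemGroupFilter last_dataset_indices ds.1 (fun i => 0 ≤ i ∧ i < ds.2) i
  have hfun : (fun (st : List Int × List Int × Int) (ds : String × Int) =>
      let inner := (PySem.List.pyRange 0 ds.2 1).foldl
        (fun (s : List Int × List Int) idx =>
          if (ds.1, idx) ∈ last_dataset_indices then (s.1, s.2 ++ [st.2.2 + idx])
          else if (ds.1, idx) ∈ all_indices then (s.1 ++ [st.2.2 + idx], s.2)
          else s) (st.1, st.2.1)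
      ((inner.1, inner.2, st.2.2 + ds.2) : List Int × List Int × Int))
      = (fun st ds =>
      let lastLocal := PySem.Set.ofList (((pvGroupByKey last_dataset_indices).getD ds.1 []).filter
        (fun i => decide (0 ≤ i ∧ i < ds.2)))
      let otherLocal := PySem.Set.ofList (((pvGroupByKey all_indices).getD ds.1 []).filter
        (fun i => decide (0 ≤ i ∧ i < ds.2 ∧ i ∉ lastLocal)))
      (st.1 ++ (PySem.List.sorted otherLocal (fun x => x) false).map (fun i => st.2.2 + i),
       st.2.1 ++ (PySem.List.sorted lastLocal (fun x => x) false).map (fun i => st.2.2 + i),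
       st.2.2 + ds.2)) := by
    funext st ds
    have hlast : PySem.List.sorted (PySem.Set.ofList
          (((pvGroupByKey last_dataset_indices).getD ds.1 []).filter
            (fun i => decide (0 ≤ i ∧ i < ds.2)))) (fun x => x) false
        = (PySem.List.pyRange 0 ds.2 1).filter (fun i => decide ((ds.1, i) ∈ last_dataset_indices)) := by
      refine pvSortedSet _ (PySem.Set.nodup_ofList _) ds.2
        (fun i => (ds.1, i) ∈ last_dataset_indices) (fun i => ?_)
      rw [memLast]
    have hother : PySem.List.sorted (PySem.Set.ofList
          (((pvGroupByKey all_indices).getD ds.1 []).filter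
            (fun i => decide (0 ≤ i ∧ i < ds.2 ∧
              i ∉ PySem.Set.ofList (((pvGroupByKey last_dataset_indices).getD ds.1 []).filter
                    (fun i => decide (0 ≤ i ∧ i < ds.2))))))) (fun x => x) false
        = (PySem.List.pyRange 0 ds.2 1).filter
            (fun i => decide ((ds.1, i) ∉ last_dataset_indices ∧ (ds.1, i) ∈ all_indices)) := by
      refine pvSortedSet _ (PySem.Set.nodup_ofList _) ds.2
        (fun i => (ds.1, i) ∉ last_dataset_indices ∧ (ds.1, i) ∈ all_indices) (fun i => ?_)
      rw [pvMemGroupFilter all_indices ds.1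
            (fun i => 0 ≤ i ∧ i < ds.2 ∧
              i ∉ PySem.Set.ofList (((pvGroupByKey last_dataset_indices).getD ds.1 []).filter
                    (fun i => decide (0 ≤ i ∧ i < ds.2)))) i]
      constructor
      · rintro ⟨h1, h2, h3, h4⟩
        exact ⟨⟨fun hl => h4 ((memLast ds i).2 ⟨hl, h2, h3⟩), h1⟩, h2, h3⟩
      · rintro ⟨⟨h4, h1⟩, h2, h3⟩
        exact ⟨h1, h2, h3, fun hl => h4 ((memLast ds i).1 hl).1⟩
    simp only [pvInner, hlast, hother]
  rw [hfun]
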